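-- pv_equiv track=rewrite | github.com/jb-612/tirvi | tirvi/adapters/dictabert/inference.py | _compute_chunks
-- ===== SOURCE A (Python) =====
-- def _compute_chunks(
--     word_subcounts: list[int],
--     max_subtokens: int,
--     overlap_subtokens: int,
-- ) -> list[tuple[int, int]]:
--     """Return [(start, end)) word-index pairs covering all words with overlap."""
--     chunks: list[tuple[int, int]] = []
--     n = len(word_subcounts)
--     start = 0
--     while start < n:
--         end = _scan_chunk_end(word_subcounts, start, max_subtokens)
--         chunks.append((start, end))
--         if end >= n:
--             break
--         start = _find_overlap_start(word_subcounts, end, overlap_subtokens)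
--     return chunks
--
-- def _scan_chunk_end(
--     word_subcounts: list[int], start: int, max_subtokens: int
-- ) -> int:
--     """Walk forward from ``start`` while the running sub-token sum fits."""
--     end = start
--     running = 0
--     n = len(word_subcounts)
--     while end < n and running + word_subcounts[end] <= max_subtokens:
--         running += word_subcounts[end]
--         end += 1
--     if end == start:
--         # Single word exceeds the cap; force-include it to make progress.
--         end = start + 1
--     return end
--
-- def _find_overlap_start(
--     word_subcounts: list[int], chunk_end: int, overlap_subtokens: int
-- ) -> int:
--     """Walk backward from ``chunk_end`` summing words up to the overlap budget."""
--     accum = 0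
--     i = chunk_end - 1
--     while i >= 0 and accum + word_subcounts[i] <= overlap_subtokens:
--         accum += word_subcounts[i]
--         i -= 1
--     next_start = i + 1
--     if next_start >= chunk_end:
--         next_start = chunk_end - 1
--     return next_start
-- ===== SOURCE B (Python) =====
-- def _compute_chunks(
--     word_subcounts: list[int],
--     max_subtokens: int,
--     overlap_subtokens: int,
-- ) -> list[tuple[int, int]]:
--     """Return [(start, end)) word-index pairs covering all words with overlap.
--
--     Prefix sums + hand-rolled binary searches: each chunk boundary is found in
--     O(log n) instead of rescanning the words of the chunk and of the overlap.
--     """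
--     n = len(word_subcounts)
--     prefix = [0]
--     total = 0
--     for w in word_subcounts:
--         total += w
--         prefix.append(total)
--     chunks: list[tuple[int, int]] = []
--     start = 0
--     while start < n:
--         # largest end in [start, n] with prefix[end] - prefix[start] <= max_subtokens
--         end = _last_le(prefix, prefix[start] + max_subtokens, start, n)
--         if end == start:
--             # Single word exceeds the cap; force-include it to make progress.
--             end = start + 1
--         chunks.append((start, end))
--         if end >= n:
--             break
--         # smallest j in [0, end] with prefix[end] - prefix[j] <= overlap_subtokens
--         next_start = _first_ge(prefix, prefix[end] - overlap_subtokens, 0, end)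
--         if next_start >= end:
--             next_start = end - 1
--         start = next_start
--     return chunks
--
--
-- def _last_le(prefix: list[int], limit: int, lo: int, hi: int) -> int:
--     """Largest e in [lo, hi] with prefix[e] <= limit (assumes prefix[lo] <= limit)."""
--     while lo < hi:
--         mid = (lo + hi + 1) // 2
--         if prefix[mid] <= limit:
--             lo = mid
--         else:
--             hi = mid - 1
--     return lo
--
--
-- def _first_ge(prefix: list[int], bound: int, lo: int, hi: int) -> int:
--     """Smallest j in [lo, hi] with prefix[j] >= bound (assumes prefix[hi] >= bound)."""
--     while lo < hi:
--         mid = (lo + hi) // 2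
--         if prefix[mid] >= bound:
--             hi = mid
--         else:
--             lo = mid + 1
--     return lo
-- ===== Notes on version B (the rewrite author's own statement) =====
-- stated objective: alternative
-- what changed: B builds a prefix-sum array once and finds each chunk end and each overlap start by a hand-rolled binary search over it, instead of A's per-chunk forward and backward word-by-word rescans.
-- outside the precondition, e.g. on _compute_chunks([8, -2, 4, 3, 6], 10, 2): A returns [(0, 3), (2, 4), (3, 5)], B returns [(0, 3), (1, 4), (3, 5)]; on _compute_chunks([6, 0, 0, 8, -1, 3], 13, 0): A returns [(0, 3), (1, 6)], B returns [(0, 5), (4, 6)]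
import Mathlib
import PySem

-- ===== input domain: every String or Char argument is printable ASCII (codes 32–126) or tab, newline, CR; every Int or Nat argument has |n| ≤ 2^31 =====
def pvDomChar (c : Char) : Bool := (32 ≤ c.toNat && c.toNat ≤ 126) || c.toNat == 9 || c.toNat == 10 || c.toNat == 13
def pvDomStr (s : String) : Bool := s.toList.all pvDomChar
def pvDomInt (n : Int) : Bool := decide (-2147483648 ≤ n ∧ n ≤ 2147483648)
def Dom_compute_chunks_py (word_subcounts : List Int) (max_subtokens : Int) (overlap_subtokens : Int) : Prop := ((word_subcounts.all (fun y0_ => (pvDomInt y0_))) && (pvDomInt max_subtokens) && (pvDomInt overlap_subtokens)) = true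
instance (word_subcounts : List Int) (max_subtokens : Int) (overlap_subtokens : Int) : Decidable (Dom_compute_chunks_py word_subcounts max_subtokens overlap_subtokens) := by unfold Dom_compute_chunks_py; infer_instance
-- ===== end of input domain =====

-- B replaces A's per-chunk forward/backward word rescans by prefix sums with two
-- hand-rolled binary searches (alternative algorithm; return value only).

-- ===== PORT A =====
-- inner while-loop of _scan_chunk_end; fuel only makes the Python 'while' total
def pvA_scanGo (ws : List Int) (maxs : Int) : Nat → Int → Int → Int
  | 0, e, _ => e
  | f+1, e, running =>
    if e < (ws.length : Int) then
      match PySem.List.pyGet? ws e with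
      | some w => if running + w ≤ maxs then pvA_scanGo ws maxs f (e+1) (running+w) else e
      | none => e
    else e

def pvA_scanChunkEnd (ws : List Int) (start maxs : Int) : Int :=
  let e := pvA_scanGo ws maxs ws.length start 0
  if e = start then start + 1 else e

-- inner while-loop of _find_overlap_start
def pvA_ovGo (ws : List Int) (ov : Int) : Nat → Int → Int → Int
  | 0, i, _ => i
  | f+1, i, accum =>
    if 0 ≤ i then
      match PySem.List.pyGet? ws i with
      | some w => if accum + w ≤ ov then pvA_ovGo ws ov f (i-1) (accum+w) else i
      | none => i
    else i

def pvA_findOverlapStart (ws : List Int) (chunk_end ov : Int) : Int :=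
  let i := pvA_ovGo ws ov ws.length (chunk_end - 1) 0
  let next := i + 1
  if chunk_end ≤ next then chunk_end - 1 else next

-- outer while-loop of _compute_chunks
def pvA_loop (ws : List Int) (maxs ov : Int) : Nat → Int → List (Int × Int) → List (Int × Int)
  | 0, _, chunks => chunks
  | f+1, start, chunks =>
    if start < (ws.length : Int) then
      let e := pvA_scanChunkEnd ws start maxs
      let chunks' := chunks ++ [(start, e)]
      if (ws.length : Int) ≤ e then chunks'
      else pvA_loop ws maxs ov f (pvA_findOverlapStart ws e ov) chunks'
    else chunks

def compute_chunks_py (word_subcounts : List Int) (max_subtokens : Int) (overlap_subtokens : Int) : List (Int × Int) :=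
  pvA_loop word_subcounts max_subtokens overlap_subtokens (word_subcounts.length + 1) 0 []

-- ===== PORT B =====
-- prefix-sum list: prefix = [0]; total = 0; for w in ws: total += w; prefix.append(total)
def pvB_prefixGo (ws : List Int) (total : Int) : List Int :=
  match ws with
  | [] => []
  | w :: rest => (total + w) :: pvB_prefixGo rest (total + w)

-- plain list indexing prefix[i]; every index B reads is in range, 0 is only a default
def pvB_pget (xs : List Int) (i : Int) : Int := PySem.List.pyGetD xs i 0

-- _last_le: largest e in [lo, hi] with prefix[e] <= limit
def pvB_lastLE (pre : List Int) (limit : Int) : Nat → Int → Int → Int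
  | 0, lo, _ => lo
  | f+1, lo, hi =>
    if lo < hi then
      let mid := PySem.Int.floordiv (lo + hi + 1) 2
      if pvB_pget pre mid ≤ limit then pvB_lastLE pre limit f mid hi
      else pvB_lastLE pre limit f lo (mid - 1)
    else lo

-- _first_ge: smallest j in [lo, hi] with prefix[j] >= bound
def pvB_firstGE (pre : List Int) (bound : Int) : Nat → Int → Int → Int
  | 0, lo, _ => lo
  | f+1, lo, hi =>
    if lo < hi then
      let mid := PySem.Int.floordiv (lo + hi) 2
      if bound ≤ pvB_pget pre mid then pvB_firstGE pre bound f lo mid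
      else pvB_firstGE pre bound f (mid+1) hi
    else lo

-- outer while-loop of B's _compute_chunks
def pvB_loop (ws pre : List Int) (maxs ov : Int) : Nat → Int → List (Int × Int) → List (Int × Int)
  | 0, _, chunks => chunks
  | f+1, start, chunks =>
    if start < (ws.length : Int) then
      let e0 := pvB_lastLE pre (pvB_pget pre start + maxs) pre.length start (ws.length : Int)
      let e := if e0 = start then start + 1 else e0
      let chunks' := chunks ++ [(start, e)]
      if (ws.length : Int) ≤ e then chunks'
      else
        let ns0 := pvB_firstGE pre (pvB_pget pre e - ov) pre.length 0 e
        let ns := if e ≤ ns0 then e - 1 else ns0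
        pvB_loop ws pre maxs ov f ns chunks'
    else chunks

def compute_chunks_py_alt (word_subcounts : List Int) (max_subtokens : Int) (overlap_subtokens : Int) : List (Int × Int) :=
  let pre := 0 :: pvB_prefixGo word_subcounts 0
  pvB_loop word_subcounts pre max_subtokens overlap_subtokens (word_subcounts.length + 1) 0 []

-- ===== PRECONDITION & SPEC =====
-- A's outer loop can fail to make progress and loop FOREVER (e.g. on ([6,6],10,2) or
-- ([1,100],10,5)); Pre_ admits: a single word (A always returns [(0,1)]); every prefix of
-- the list fitting the cap (one chunk covers everything); or the natural domain of
-- nonnegative sub-token counts with budgets under which every overlap step moves forward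
-- (each word plus the overlap, and each adjacent pair, fits the cap).  This is conservative
-- and also excludes some terminating inputs, on which B's binary searches over a
-- non-monotone prefix array may pick other (equally budget-respecting) boundaries (cites).
def Pre_compute_chunks_py (word_subcounts : List Int) (max_subtokens : Int) (overlap_subtokens : Int) : Prop :=
  word_subcounts.length ≤ 1 ∨
  (∀ k : Nat, k ≤ word_subcounts.length → (word_subcounts.take k).sum ≤ max_subtokens) ∨
  ((∀ w ∈ word_subcounts, 0 ≤ w) ∧ 0 ≤ overlap_subtokens ∧
    (∀ w ∈ word_subcounts, w + overlap_subtokens ≤ max_subtokens) ∧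
    ∀ p ∈ word_subcounts.zip word_subcounts.tail, p.1 + p.2 ≤ max_subtokens)
instance (word_subcounts : List Int) (max_subtokens : Int) (overlap_subtokens : Int) : Decidable (Pre_compute_chunks_py word_subcounts max_subtokens overlap_subtokens) := by unfold Pre_compute_chunks_py; infer_instance

def pvWitness_compute_chunks_py : List Int × Int × Int := ([1, 2, 3, 1, 2, 4], 6, 2)

def Spec_compute_chunks_py (word_subcounts : List Int) (max_subtokens : Int) (overlap_subtokens : Int) (out : List (Int × Int)) : Prop := out = compute_chunks_py_alt word_subcounts max_subtokens overlap_subtokens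
instance (word_subcounts : List Int) (max_subtokens : Int) (overlap_subtokens : Int) (out : List (Int × Int)) : Decidable (Spec_compute_chunks_py word_subcounts max_subtokens overlap_subtokens out) := by unfold Spec_compute_chunks_py; infer_instance

-- ===== CLAIM (what is proved, stated in full; the proofs are below) =====
def Claim_equal_compute_chunks_py : Prop := ∀ (word_subcounts : List Int) (max_subtokens : Int) (overlap_subtokens : Int), Dom_compute_chunks_py word_subcounts max_subtokens overlap_subtokens → Pre_compute_chunks_py word_subcounts max_subtokens overlap_subtokens → Spec_compute_chunks_py word_subcounts max_subtokens overlap_subtokens (compute_chunks_py word_subcounts max_subtokens overlap_subtokens)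

-- ===== LEMMAS AND PROOFS =====

-- prefix sum of the first k words (proof-side view of B's prefix list)
def pvPfx (ws : List Int) (k : Nat) : Int := (ws.take k).sum

theorem pvPfx_succ (ws : List Int) (e : Nat) (h : e < ws.length) :
    pvPfx ws (e+1) = pvPfx ws e + ws[e] := List.sum_take_succ ws e h

theorem pvPfx_mono (ws : List Int) (hnn : ∀ w ∈ ws, 0 ≤ w) {a b : Nat} (hab : a ≤ b) :
    pvPfx ws a ≤ pvPfx ws b := by
  induction b, hab using Nat.le_induction with
  | base => exact le_refl _
  | succ b hb ih =>
    rcases lt_or_ge b ws.length with h | h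
    · have := pvPfx_succ ws b h
      have hw : 0 ≤ ws[b] := hnn _ (List.getElem_mem _)
      omega
    · have : pvPfx ws (b+1) = pvPfx ws b := by
        unfold pvPfx
        rw [List.take_of_length_le h, List.take_of_length_le (by omega)]
      omega

theorem pvB_prefixGo_length (ws : List Int) (t : Int) : (pvB_prefixGo ws t).length = ws.length := by
  induction ws generalizing t with
  | nil => rfl
  | cons w rest ih => simp [pvB_prefixGo, ih]

theorem pvB_prefixGo_get (ws : List Int) (t : Int) (j : Nat) (hj : j < ws.length) :
    (pvB_prefixGo ws t)[j]? = some (t + pvPfx ws (j+1)) := by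
  induction ws generalizing t j with
  | nil => simp at hj
  | cons w rest ih =>
    cases j with
    | zero => simp [pvB_prefixGo, pvPfx]
    | succ j =>
      simp only [pvB_prefixGo, List.getElem?_cons_succ]
      rw [ih _ j (by simpa using hj)]
      simp only [pvPfx, List.take_succ_cons, List.sum_cons]
      ring_nf

theorem pvB_pget_prefix (ws : List Int) (k : Nat) (hk : k ≤ ws.length) :
    pvB_pget (0 :: pvB_prefixGo ws 0) (k : Int) = pvPfx ws k := by
  cases k with
  | zero => simp [pvB_pget, pvPfx]
  | succ j =>
    rw [pvB_pget, PySem.List.pyGetD_natCast]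
    simp only [List.getD, List.getElem?_cons_succ]
    rw [pvB_prefixGo_get ws 0 j (by omega)]
    simp

theorem pvA_scanGo_spec (ws : List Int) (maxs base : Int) :
    ∀ (f : Nat) (e : Nat), e ≤ ws.length → ws.length - e ≤ f →
      pvPfx ws e - base ≤ maxs →
      ∃ r : Nat, pvA_scanGo ws maxs f (e : Int) (pvPfx ws e - base) = (r : Int) ∧
        e ≤ r ∧ r ≤ ws.length ∧ pvPfx ws r - base ≤ maxs ∧
        (r < ws.length → maxs < pvPfx ws (r+1) - base) := by
  intro f
  induction f with
  | zero =>
    intro e he hf hinit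
    exact ⟨e, rfl, le_refl _, he, hinit, by omega⟩
  | succ f ih =>
    intro e he hf hinit
    by_cases hlt : e < ws.length
    · have hget : PySem.List.pyGet? ws (e : Int) = some ws[e] := by
        rw [PySem.List.pyGet?_natCast, List.getElem?_eq_getElem hlt]
      simp only [pvA_scanGo, hget]
      rw [if_pos (by exact_mod_cast hlt)]
      by_cases hcond : pvPfx ws e - base + ws[e] ≤ maxs
      · rw [if_pos hcond]
        have hstep : pvPfx ws e - base + ws[e] = pvPfx ws (e+1) - base := by
          have := pvPfx_succ ws e hlt; omega
        have hcast : (e : Int) + 1 = ((e+1 : Nat) : Int) := by push_cast; ring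
        rw [hstep, hcast]
        obtain ⟨r, hr, h1, h2, h3, h4⟩ := ih (e+1) (by omega) (by omega) (by omega)
        exact ⟨r, hr, by omega, h2, h3, h4⟩
      · rw [if_neg hcond]
        refine ⟨e, rfl, le_refl _, he, hinit, fun _ => ?_⟩
        have := pvPfx_succ ws e hlt; omega
    · simp only [pvA_scanGo]
      rw [if_neg (by exact_mod_cast hlt)]
      exact ⟨e, rfl, le_refl _, he, hinit, by omega⟩

theorem pvB_lastLE_spec (ws pre : List Int) (limit : Int)
    (hget : ∀ k : Nat, k ≤ ws.length → pvB_pget pre (k : Int) = pvPfx ws k) :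
    ∀ (f : Nat) (lo hi : Nat), lo ≤ hi → hi ≤ ws.length → hi - lo ≤ f →
      pvPfx ws lo ≤ limit →
      ∃ r : Nat, pvB_lastLE pre limit f (lo : Int) (hi : Int) = (r : Int) ∧
        lo ≤ r ∧ r ≤ hi ∧ pvPfx ws r ≤ limit ∧ (r = hi ∨ limit < pvPfx ws (r+1)) := by
  intro f
  induction f with
  | zero =>
    intro lo hi hlh hhn hf hP
    have : lo = hi := by omega
    exact ⟨lo, rfl, le_refl _, by omega, hP, Or.inl this⟩
  | succ f ih =>
    intro lo hi hlh hhn hf hP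
    by_cases hlt : lo < hi
    · simp only [pvB_lastLE]
      rw [if_pos (by exact_mod_cast hlt)]
      set m : Nat := (lo + hi + 1) / 2 with hm
      have hmid : PySem.Int.floordiv ((lo : Int) + hi + 1) 2 = (m : Int) := by
        have : (lo : Int) + hi + 1 = ((lo + hi + 1 : Nat) : Int) := by push_cast; ring
        rw [this]
        exact_mod_cast PySem.Int.floordiv_natCast (lo + hi + 1) 2
      have hmlo : lo < m := by omega
      have hmhi : m ≤ hi := by omega
      rw [hmid, hget m (by omega)]
      by_cases hc : pvPfx ws m ≤ limit
      · rw [if_pos hc]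
        obtain ⟨r, hr, h1, h2, h3, h4⟩ := ih m hi (by omega) hhn (by omega) hc
        exact ⟨r, hr, by omega, h2, h3, h4⟩
      · rw [if_neg hc]
        have hcast : (m : Int) - 1 = ((m - 1 : Nat) : Int) := by omega
        rw [hcast]
        obtain ⟨r, hr, h1, h2, h3, h4⟩ := ih lo (m-1) (by omega) (by omega) (by omega) hP
        refine ⟨r, hr, h1, by omega, h3, Or.inr ?_⟩
        rcases h4 with h | h
        · have : r + 1 = m := by omega
          rw [this]; omega
        · exact h
    · simp only [pvB_lastLE]
      rw [if_neg (by exact_mod_cast hlt)]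
      exact ⟨lo, rfl, le_refl _, by omega, hP, Or.inl (by omega)⟩

theorem pvA_ovGo_spec (ws : List Int) (ov : Int) (ce : Nat) (hce : ce ≤ ws.length) :
    ∀ (f : Nat) (j : Nat), j ≤ ce → j ≤ f →
      pvPfx ws ce - pvPfx ws j ≤ ov →
      ∃ j' : Nat, pvA_ovGo ws ov f ((j : Int) - 1) (pvPfx ws ce - pvPfx ws j) = (j' : Int) - 1 ∧
        j' ≤ j ∧ pvPfx ws ce - pvPfx ws j' ≤ ov ∧
        (j' = 0 ∨ ov < pvPfx ws ce - pvPfx ws (j'-1)) := by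
  intro f
  induction f with
  | zero =>
    intro j hj hf hQ
    have : j = 0 := by omega
    subst this
    exact ⟨0, rfl, le_refl _, hQ, Or.inl rfl⟩
  | succ f ih =>
    intro j hj hf hQ
    cases j with
    | zero =>
      simp only [pvA_ovGo]
      rw [if_neg (by omega)]
      exact ⟨0, rfl, le_refl _, hQ, Or.inl rfl⟩
    | succ j =>
      have hjn : j < ws.length := by omega
      have hpos : (0:Int) ≤ ((j+1 : Nat) : Int) - 1 := by push_cast; omega
      have hidx : ((j+1 : Nat) : Int) - 1 = ((j : Nat) : Int) := by push_cast; ring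
      have hget : PySem.List.pyGet? ws (((j+1 : Nat) : Int) - 1) = some ws[j] := by
        rw [hidx, PySem.List.pyGet?_natCast, List.getElem?_eq_getElem hjn]
      simp only [pvA_ovGo, hget]
      rw [if_pos hpos]
      have hstep : pvPfx ws ce - pvPfx ws (j+1) + ws[j] = pvPfx ws ce - pvPfx ws j := by
        have := pvPfx_succ ws j hjn; omega
      by_cases hc : pvPfx ws ce - pvPfx ws (j+1) + ws[j] ≤ ov
      · rw [if_pos hc, hstep]
        have hcast : ((j+1 : Nat) : Int) - 1 - 1 = ((j : Nat) : Int) - 1 := by push_cast; ring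
        rw [hcast]
        obtain ⟨j', hr, h1, h2, h3⟩ := ih j (by omega) (by omega) (by omega)
        exact ⟨j', hr, by omega, h2, h3⟩
      · rw [if_neg hc]
        refine ⟨j+1, rfl, le_refl _, hQ, Or.inr ?_⟩
        simpa using by omega

theorem pvB_firstGE_spec (ws pre : List Int) (bound : Int)
    (hget : ∀ k : Nat, k ≤ ws.length → pvB_pget pre (k : Int) = pvPfx ws k) :
    ∀ (f : Nat) (lo hi : Nat), lo ≤ hi → hi ≤ ws.length → hi - lo ≤ f →
      bound ≤ pvPfx ws hi →
      ∃ r : Nat, pvB_firstGE pre bound f (lo : Int) (hi : Int) = (r : Int) ∧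
        lo ≤ r ∧ r ≤ hi ∧ bound ≤ pvPfx ws r ∧ (r = lo ∨ pvPfx ws (r-1) < bound) := by
  intro f
  induction f with
  | zero =>
    intro lo hi hlh hhn hf hP
    have : lo = hi := by omega
    subst this
    exact ⟨lo, rfl, le_refl _, le_refl _, hP, Or.inl rfl⟩
  | succ f ih =>
    intro lo hi hlh hhn hf hP
    by_cases hlt : lo < hi
    · simp only [pvB_firstGE]
      rw [if_pos (by exact_mod_cast hlt)]
      set m : Nat := (lo + hi) / 2 with hm
      have hmid : PySem.Int.floordiv ((lo : Int) + hi) 2 = (m : Int) := by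
        have : (lo : Int) + hi = ((lo + hi : Nat) : Int) := by push_cast; ring
        rw [this]
        exact_mod_cast PySem.Int.floordiv_natCast (lo + hi) 2
      have hmlo : lo ≤ m := by omega
      have hmhi : m < hi := by omega
      rw [hmid, hget m (by omega)]
      by_cases hc : bound ≤ pvPfx ws m
      · rw [if_pos hc]
        obtain ⟨r, hr, h1, h2, h3, h4⟩ := ih lo m hmlo (by omega) (by omega) hc
        exact ⟨r, hr, h1, by omega, h3, h4⟩
      · rw [if_neg hc]
        have hcast : (m : Int) + 1 = ((m + 1 : Nat) : Int) := by push_cast; ring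
        rw [hcast]
        obtain ⟨r, hr, h1, h2, h3, h4⟩ := ih (m+1) hi (by omega) hhn (by omega) hP
        refine ⟨r, hr, by omega, h2, h3, Or.inr ?_⟩
        rcases h4 with h | h
        · have : r - 1 = m := by omega
          rw [this]; omega
        · exact h
    · have : lo = hi := by omega
      subst this
      simp only [pvB_firstGE]
      rw [if_neg (by exact_mod_cast hlt)]
      exact ⟨lo, rfl, le_refl _, le_refl _, hP, Or.inl rfl⟩

-- the two chunk-end computations find the same boundary
theorem pvEnd_eq (ws : List Int) (maxs : Int)
    (hnn : ∀ w ∈ ws, 0 ≤ w) (hmax : 0 ≤ maxs) (s : Nat) (hs : s ≤ ws.length) :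
    ∃ r : Nat, pvA_scanGo ws maxs ws.length (s : Int) 0 = (r : Int) ∧
      pvB_lastLE (0 :: pvB_prefixGo ws 0) (pvB_pget (0 :: pvB_prefixGo ws 0) (s : Int) + maxs)
        (0 :: pvB_prefixGo ws 0).length (s : Int) (ws.length : Int) = (r : Int) ∧
      s ≤ r ∧ r ≤ ws.length := by
  have hgetp : ∀ k : Nat, k ≤ ws.length → pvB_pget (0 :: pvB_prefixGo ws 0) (k : Int) = pvPfx ws k :=
    fun k hk => pvB_pget_prefix ws k hk
  have hA := pvA_scanGo_spec ws maxs (pvPfx ws s) ws.length s hs (by omega) (by omega)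
  rw [sub_self] at hA
  obtain ⟨r1, hr1, ha1, ha2, ha3, ha4⟩ := hA
  have hlen : (0 :: pvB_prefixGo ws 0).length = ws.length + 1 := by
    simp [pvB_prefixGo_length]
  have hB := pvB_lastLE_spec ws (0 :: pvB_prefixGo ws 0) (pvPfx ws s + maxs) hgetp
    ((0 :: pvB_prefixGo ws 0).length) s ws.length hs (le_refl _) (by omega) (by omega)
  obtain ⟨r2, hr2, hb1, hb2, hb3, hb4⟩ := hB
  have heq : r1 = r2 := by
    rcases lt_trichotomy r1 r2 with h | h | h
    · exfalso
      have hm := pvPfx_mono ws hnn (show r1+1 ≤ r2 by omega)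
      have := ha4 (by omega)
      omega
    · exact h
    · exfalso
      rcases hb4 with hb | hb
      · omega
      · have hm := pvPfx_mono ws hnn (show r2+1 ≤ r1 by omega)
        omega
  subst heq
  rw [hgetp s hs]
  exact ⟨r1, hr1, hr2, ha1, ha2⟩

-- the two overlap-start computations find the same boundary
theorem pvOv_eq (ws : List Int) (ov : Int)
    (hnn : ∀ w ∈ ws, 0 ≤ w) (hov : 0 ≤ ov) (ce : Nat) (hce : ce ≤ ws.length) :
    ∃ j : Nat, pvA_ovGo ws ov ws.length ((ce : Int) - 1) 0 = (j : Int) - 1 ∧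
      pvB_firstGE (0 :: pvB_prefixGo ws 0) (pvB_pget (0 :: pvB_prefixGo ws 0) (ce : Int) - ov)
        (0 :: pvB_prefixGo ws 0).length (0 : Int) (ce : Int) = (j : Int) ∧
      j ≤ ce := by
  have hgetp : ∀ k : Nat, k ≤ ws.length → pvB_pget (0 :: pvB_prefixGo ws 0) (k : Int) = pvPfx ws k :=
    fun k hk => pvB_pget_prefix ws k hk
  have hA := pvA_ovGo_spec ws ov ce hce ws.length ce (le_refl _) hce (by omega)
  rw [sub_self] at hA
  obtain ⟨j1, hj1, ha1, ha2, ha3⟩ := hA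
  have hB := pvB_firstGE_spec ws (0 :: pvB_prefixGo ws 0) (pvPfx ws ce - ov) hgetp
    ((0 :: pvB_prefixGo ws 0).length) 0 ce (by omega) hce
    (by simp [pvB_prefixGo_length]; omega) (by omega)
  obtain ⟨r, hr, hb1, hb2, hb3, hb4⟩ := hB
  have heq : j1 = r := by
    rcases lt_trichotomy j1 r with h | h | h
    · exfalso
      rcases hb4 with hb | hb
      · omega
      · have hm := pvPfx_mono ws hnn (show j1 ≤ r-1 by omega)
        omega
    · exact h
    · exfalso
      rcases ha3 with ha | ha
      · omega
      · have hm := pvPfx_mono ws hnn (show r ≤ j1-1 by omega)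
        omega
  subst heq
  rw [hgetp ce hce]
  rw [Nat.cast_zero] at hr
  exact ⟨j1, hj1, hr, ha1⟩

theorem pvSingleA (w m o : Int) : compute_chunks_py [w] m o = [(0, 1)] := by
  have he : pvA_scanChunkEnd [w] 0 m = 1 := by
    by_cases h : 0 + w ≤ m <;>
      simp [pvA_scanChunkEnd, pvA_scanGo, PySem.List.pyGet?, PySem.List.pyIdx?]
  simp [compute_chunks_py, pvA_loop, he]

theorem pvSingleB (w m o : Int) : compute_chunks_py_alt [w] m o = [(0, 1)] := by
  by_cases h : w ≤ 0 + m
  · have he : pvB_lastLE [0, w] (pvB_pget [0, w] 0 + m) 2 0 (1 : Int) = 1 := by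
      simp [pvB_lastLE, pvB_pget, PySem.List.pyGetD,
        PySem.Int.floordiv, Int.fdiv]
      omega
    simp [compute_chunks_py_alt, pvB_loop, pvB_prefixGo, he]
  · have he : pvB_lastLE [0, w] (pvB_pget [0, w] 0 + m) 2 0 (1 : Int) = 0 := by
      simp [pvB_lastLE, pvB_pget, PySem.List.pyGetD,
        PySem.Int.floordiv, Int.fdiv]
      omega
    simp [compute_chunks_py_alt, pvB_loop, pvB_prefixGo, he]
theorem pvA_scanGo_all (ws : List Int) (maxs : Int)
    (hall : ∀ k : Nat, k ≤ ws.length → pvPfx ws k ≤ maxs) :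
    ∀ (f : Nat) (e : Nat), e ≤ ws.length → ws.length - e ≤ f →
      pvA_scanGo ws maxs f (e : Int) (pvPfx ws e) = (ws.length : Int) := by
  intro f
  induction f with
  | zero =>
    intro e he hf
    have : e = ws.length := by omega
    subst this
    simp [pvA_scanGo]
  | succ f ih =>
    intro e he hf
    by_cases hlt : e < ws.length
    · have hget : PySem.List.pyGet? ws (e : Int) = some ws[e] := by
        rw [PySem.List.pyGet?_natCast, List.getElem?_eq_getElem hlt]
      simp only [pvA_scanGo, hget]
      rw [if_pos (by exact_mod_cast hlt)]
      have hc : pvPfx ws e + ws[e] ≤ maxs := by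
        have := pvPfx_succ ws e hlt
        have := hall (e+1) (by omega)
        omega
      rw [if_pos hc]
      have hcast : (e : Int) + 1 = ((e+1 : Nat) : Int) := by push_cast; ring
      rw [hcast, show pvPfx ws e + ws[e] = pvPfx ws (e+1) from by rw [pvPfx_succ ws e hlt]]
      exact ih (e+1) (by omega) (by omega)
    · have : e = ws.length := by omega
      subst this
      simp [pvA_scanGo]

theorem pvB_lastLE_all (ws pre : List Int) (limit : Int)
    (hget : ∀ k : Nat, k ≤ ws.length → pvB_pget pre (k : Int) = pvPfx ws k)
    (hall : ∀ k : Nat, k ≤ ws.length → pvPfx ws k ≤ limit) :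
    ∀ (f : Nat) (lo hi : Nat), lo ≤ hi → hi ≤ ws.length → hi - lo ≤ f →
      pvB_lastLE pre limit f (lo : Int) (hi : Int) = (hi : Int) := by
  intro f
  induction f with
  | zero => intro lo hi h1 h2 hf
            have : lo = hi := by omega
            subst this; simp [pvB_lastLE]
  | succ f ih =>
    intro lo hi h1 h2 hf
    by_cases hlt : lo < hi
    · simp only [pvB_lastLE]
      rw [if_pos (by exact_mod_cast hlt)]
      set m : Nat := (lo + hi + 1) / 2 with hm
      have hmid : PySem.Int.floordiv ((lo : Int) + hi + 1) 2 = (m : Int) := by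
        have : (lo : Int) + hi + 1 = ((lo + hi + 1 : Nat) : Int) := by push_cast; ring
        rw [this]
        exact_mod_cast PySem.Int.floordiv_natCast (lo + hi + 1) 2
      rw [hmid, hget m (by omega)]
      rw [if_pos (hall m (by omega))]
      exact ih m hi (by omega) h2 (by omega)
    · have : lo = hi := by omega
      subst this; simp [pvB_lastLE]


-- one chunk covers everything: both programs return [(0, n)]
theorem pvAllFit (ws : List Int) (maxs ov : Int) (hne : ws ≠ [])
    (hall : ∀ k : Nat, k ≤ ws.length → (ws.take k).sum ≤ maxs) :
    compute_chunks_py ws maxs ov = [((0 : Int), (ws.length : Int))] ∧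
    compute_chunks_py_alt ws maxs ov = [((0 : Int), (ws.length : Int))] := by
  have hn : 1 ≤ ws.length := by
    cases ws with
    | nil => simp at hne
    | cons a l => simp
  have hall' : ∀ k : Nat, k ≤ ws.length → pvPfx ws k ≤ maxs := hall
  have hA : pvA_scanGo ws maxs ws.length (0 : Int) 0 = (ws.length : Int) := by
    have := pvA_scanGo_all ws maxs hall' ws.length 0 (by omega) (by omega)
    simpa [pvPfx] using this
  have hgetp : ∀ k : Nat, k ≤ ws.length → pvB_pget (0 :: pvB_prefixGo ws 0) (k : Int) = pvPfx ws k :=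
    fun k hk => pvB_pget_prefix ws k hk
  have hB : pvB_lastLE (0 :: pvB_prefixGo ws 0) (pvB_pget (0 :: pvB_prefixGo ws 0) 0 + maxs)
      (0 :: pvB_prefixGo ws 0).length (0 : Int) (ws.length : Int) = (ws.length : Int) := by
    have hl : ∀ k : Nat, k ≤ ws.length → pvPfx ws k ≤ pvB_pget (0 :: pvB_prefixGo ws 0) 0 + maxs := by
      intro k hk
      have h0 : pvB_pget (0 :: pvB_prefixGo ws 0) ((0 : Nat) : Int) = pvPfx ws 0 := hgetp 0 (by omega)
      have h0' : pvB_pget (0 :: pvB_prefixGo ws 0) (0 : Int) = 0 := by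
        simpa [pvPfx] using h0
      rw [h0']
      have := hall' k hk; omega
    have := pvB_lastLE_all ws (0 :: pvB_prefixGo ws 0) (pvB_pget (0 :: pvB_prefixGo ws 0) 0 + maxs)
      hgetp hl ((0 :: pvB_prefixGo ws 0).length) 0 ws.length (by omega) (le_refl _)
      (by simp [pvB_prefixGo_length])
    simpa using this
  constructor
  · show pvA_loop ws maxs ov (ws.length + 1) 0 [] = _
    simp only [pvA_loop, pvA_scanChunkEnd, hA]
    rw [if_pos (by exact_mod_cast hn)]
    rw [if_neg (show ¬ ((ws.length : Int) = 0) from by exact_mod_cast (by omega : ¬ ws.length = 0))]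
    rw [if_pos (le_refl _)]
    simp
  · show pvB_loop ws (0 :: pvB_prefixGo ws 0) maxs ov (ws.length + 1) 0 [] = _
    simp only [pvB_loop, hB]
    rw [if_pos (by exact_mod_cast hn)]
    rw [if_neg (show ¬ ((ws.length : Int) = 0) from by exact_mod_cast (by omega : ¬ ws.length = 0))]
    rw [if_pos (le_refl _)]
    simp

theorem pvLoop_eq (ws : List Int) (maxs ov : Int)
    (hnn : ∀ w ∈ ws, 0 ≤ w) (hov : 0 ≤ ov) (hmax : 0 ≤ maxs) :
    ∀ (f : Nat) (s : Nat) (acc : List (Int × Int)),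
      pvA_loop ws maxs ov f (s : Int) acc =
      pvB_loop ws (0 :: pvB_prefixGo ws 0) maxs ov f (s : Int) acc := by
  intro f
  induction f with
  | zero => intro s acc; rfl
  | succ f ih =>
    intro s acc
    by_cases hs : s < ws.length
    · obtain ⟨r, hrA, hrB, hsr, hrn⟩ := pvEnd_eq ws maxs hnn hmax s (by omega)
      -- the common post-guard end index
      set eN : Nat := if r = s then s + 1 else r with heN
      have heN1 : 1 ≤ eN := by rw [heN]; split <;> omega
      have heNn : eN ≤ ws.length := by rw [heN]; split <;> omega
      have hA_end : pvA_scanChunkEnd ws (s : Int) maxs = (eN : Int) := by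
        simp only [pvA_scanChunkEnd, hrA]
        by_cases hrs : r = s
        · rw [if_pos (by exact_mod_cast hrs)]
          rw [heN]; rw [if_pos hrs]; push_cast; ring
        · rw [if_neg (fun h => hrs (by exact_mod_cast h))]
          rw [heN]; rw [if_neg hrs]
      have hB_end : (if ((r : Int)) = ((s : Int)) then ((s : Int)) + 1 else ((r : Int))) = (eN : Int) := by
        by_cases hrs : r = s
        · rw [if_pos (by exact_mod_cast hrs)]
          rw [heN]; rw [if_pos hrs]; push_cast; ring
        · rw [if_neg (fun h => hrs (by exact_mod_cast h))]
          rw [heN]; rw [if_neg hrs]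
      simp only [pvA_loop, pvB_loop]
      rw [if_pos (show ((s:Int)) < ((ws.length:Int)) by exact_mod_cast hs),
          if_pos (show ((s:Int)) < ((ws.length:Int)) by exact_mod_cast hs)]
      rw [hA_end, hrB, hB_end]
      by_cases hend : ws.length ≤ eN
      · have hend' : ((ws.length : Int)) ≤ ((eN : Int)) := by exact_mod_cast hend
        rw [if_pos hend', if_pos hend']
      · have hend' : ¬ ((ws.length : Int)) ≤ ((eN : Int)) := fun h => hend (by exact_mod_cast h)
        rw [if_neg hend', if_neg hend']
        obtain ⟨jv, hjA, hjB, hjc⟩ := pvOv_eq ws ov hnn hov eN (by omega)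
        simp only [pvA_findOverlapStart]
        rw [hjA, hjB]
        have hnext : (((jv : Nat) : Int) - 1) + 1 = ((jv : Nat) : Int) := by ring
        rw [hnext]
        by_cases hcl : eN ≤ jv
        · have hcl' : ((eN : Int)) ≤ ((jv : Int)) := by exact_mod_cast hcl
          rw [if_pos hcl']
          have : ((eN : Nat) : Int) - 1 = ((eN - 1 : Nat) : Int) := by omega
          rw [this]
          exact ih (eN - 1) _
        · have hcl' : ¬ ((eN : Int)) ≤ ((jv : Int)) := fun h => hcl (by exact_mod_cast h)
          rw [if_neg hcl']
          exact ih jv _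
    · simp only [pvA_loop, pvB_loop]
      rw [if_neg (show ¬ ((s:Int)) < ((ws.length:Int)) from fun h => hs (by exact_mod_cast h)),
          if_neg (show ¬ ((s:Int)) < ((ws.length:Int)) from fun h => hs (by exact_mod_cast h))]

-- ===== VERDICT (by name: the statement is the Claim_ definition above) =====
theorem compute_chunks_py_spec : Claim_equal_compute_chunks_py := by
  intro ws maxs ov _hdom hpre
  unfold Spec_compute_chunks_py
  rcases hpre with hlen | hall | ⟨hnn, hov, hcap, hpair⟩
  · cases ws with
    | nil => rfl
    | cons w rest =>
      cases rest with
      | nil => rw [pvSingleA w maxs ov, pvSingleB w maxs ov]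
      | cons w2 rest2 => simp at hlen
  · cases ws with
    | nil => rfl
    | cons w rest =>
      obtain ⟨h1, h2⟩ := pvAllFit (w :: rest) maxs ov (by simp) hall
      rw [h1, h2]
  · cases ws with
    | nil => rfl
    | cons w rest =>
      have hmax : 0 ≤ maxs := by
        have hw := hnn w (by simp)
        have := hcap w (by simp)
        omega
      exact pvLoop_eq (w :: rest) maxs ov hnn hov hmax ((w :: rest).length + 1) 0 []
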